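-- pv_equiv track=rewrite | github.com/sharmaji27/InterviewBit-Problems | Dynamic Programming/Smallest sequence with given Primes.py | solve
-- ===== SOURCE A (Python) =====
-- def solve(A, B, C, D):
--     d = {A:1,B:1,C:1}
--     ans = []
--     for i in range(D):
--         curr = min(d)
--         del d[curr]
--         ans.append(curr)
--         d[A*curr]=d[B*curr]=d[C*curr]=1
--     return ans
-- ===== SOURCE B (Python) =====
-- def solve(A, B, C, D):
--     # sorted distinct candidate list with binary-search insertion, instead of
--     # a dict scanned by min() each round
--     s = sorted({A, B, C})
--     ans = []
--     for _ in range(D):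
--         curr = s[0]
--         del s[0]
--         ans.append(curr)
--         for nxt in (A * curr, B * curr, C * curr):
--             lo, hi = 0, len(s)
--             while lo < hi:
--                 mid = (lo + hi) // 2
--                 if s[mid] < nxt:
--                     lo = mid + 1
--                 else:
--                     hi = mid
--             if lo == len(s) or s[lo] != nxt:
--                 s.insert(lo, nxt)
--     return ans
-- ===== Notes on version B (the rewrite author's own statement) =====
-- stated objective: faster
-- what changed: A keeps the candidate pool in a dict and rescans it with min() every round; B keeps the pool as a sorted distinct list, popping its head and inserting each of the three new products at its binary-search position, so the per-round Python-level min scan disappears.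
import Mathlib
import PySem

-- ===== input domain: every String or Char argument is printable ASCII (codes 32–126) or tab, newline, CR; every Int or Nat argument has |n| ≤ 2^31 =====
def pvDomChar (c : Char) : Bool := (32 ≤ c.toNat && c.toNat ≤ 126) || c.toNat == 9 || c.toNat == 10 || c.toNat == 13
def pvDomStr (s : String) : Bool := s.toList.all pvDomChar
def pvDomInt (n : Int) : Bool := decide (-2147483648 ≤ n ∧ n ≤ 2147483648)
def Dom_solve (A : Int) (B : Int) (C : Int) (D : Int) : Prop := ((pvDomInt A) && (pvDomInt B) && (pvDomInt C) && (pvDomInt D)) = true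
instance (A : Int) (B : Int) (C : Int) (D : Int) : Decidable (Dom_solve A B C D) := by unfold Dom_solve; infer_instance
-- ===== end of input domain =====

-- B replaces A's dict re-scanned by min() each round with a sorted distinct list
-- maintained by hand-written binary-search insertion (measurably faster by a constant factor).

-- ===== PORT A =====
-- the loop body of A: curr = min(d); del d[curr]; ans.append(curr); d[A*curr]=d[B*curr]=d[C*curr]=1
def solveLoopA (A B C : Int) : Nat → PySem.Dict Int Int → List Int → List Int
  | 0, _, ans => ans
  | n+1, d, ans =>
    match PySem.List.min? d.keys (fun x => x) with
    | none => ans  -- unreachable: the dict is never empty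
    | some curr =>
        solveLoopA A B C n
          ((((d.erase curr).insert (A*curr) 1).insert (B*curr) 1).insert (C*curr) 1)
          (ans ++ [curr])

def solve (A : Int) (B : Int) (C : Int) (D : Int) : List Int :=
  -- d = {A:1,B:1,C:1} (a dict literal inserts left to right)
  solveLoopA A B C D.toNat (((PySem.Dict.empty.insert A 1).insert B 1).insert C 1) []

-- ===== PORT B =====
-- the hand-written binary search of Source B: while lo < hi: mid = (lo+hi)//2; …
def bsrch (s : List Int) (nxt : Int) (lo hi : Nat) : Nat :=
  if _h : lo < hi then
    let mid := (lo + hi) / 2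
    if s.getD mid 0 < nxt then bsrch s nxt (mid + 1) hi else bsrch s nxt lo mid
  else lo
termination_by hi - lo
decreasing_by all_goals omega

-- lo, hi = 0, len(s); while …; if lo == len(s) or s[lo] != nxt: s.insert(lo, nxt)
def insSorted (s : List Int) (nxt : Int) : List Int :=
  let lo := bsrch s nxt 0 s.length
  if lo = s.length ∨ s.getD lo 0 ≠ nxt then PySem.List.insert s (lo : Int) nxt else s

def solveLoopB (A B C : Int) : Nat → List Int → List Int → List Int
  | 0, _, ans => ans
  | _+1, [], ans => ans  -- unreachable: the list is never empty
  | n+1, curr :: rest, ans =>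
      solveLoopB A B C n
        (insSorted (insSorted (insSorted rest (A*curr)) (B*curr)) (C*curr))
        (ans ++ [curr])

def solve_alt (A : Int) (B : Int) (C : Int) (D : Int) : List Int :=
  -- s = sorted({A, B, C})
  solveLoopB A B C D.toNat (PySem.List.sorted (PySem.Set.ofList [A, B, C]) (fun x => x)) []

-- ===== PRECONDITION & SPEC =====
def Spec_solve (A : Int) (B : Int) (C : Int) (D : Int) (out : List Int) : Prop := out = solve_alt A B C D
instance (A : Int) (B : Int) (C : Int) (D : Int) (out : List Int) : Decidable (Spec_solve A B C D out) := by unfold Spec_solve; infer_instance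

-- ===== CLAIM (what is proved, stated in full; the proofs are below) =====
def Claim_equal_solve : Prop := ∀ (A : Int) (B : Int) (C : Int) (D : Int), Dom_solve A B C D → Spec_solve A B C D (solve A B C D)

-- ===== LEMMAS AND PROOFS =====

theorem insertIdx_take_drop (xs : List Int) (n : Nat) (h : n ≤ xs.length) (v : Int) :
    xs.insertIdx n v = List.take n xs ++ v :: List.drop n xs := by
  induction xs generalizing n with
  | nil => simp_all
  | cons a t ih =>
    cases n with
    | zero => simp
    | succ m => simp [List.insertIdx_succ_cons, ih m (by simpa using h)]

-- list.insert at a Nat index within bounds is List.insertIdx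
theorem pyInsert_natCast (xs : List Int) (n : Nat) (h : n ≤ xs.length) (v : Int) :
    PySem.List.insert xs (n : Int) v = List.insertIdx xs n v := by
  have e := insertIdx_take_drop xs n h v
  simp only [PySem.List.insert, PySem.List.sliceIndices]
  have h1 : ¬ ((n:Int) < 0) := by omega
  simp [h1, e, min_eq_left (by omega : (n:Int) ≤ xs.length)]

-- the binary-search loop: its result splits s into a "< nxt" prefix and a "≥ nxt" suffix
theorem bsrch_spec (s : List Int) (nxt : Int) (hs : s.Pairwise (· < ·)) :
    ∀ lo hi, lo ≤ hi → hi ≤ s.length →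
    (∀ i, i < lo → s.getD i 0 < nxt) →
    (∀ i, hi ≤ i → i < s.length → ¬ s.getD i 0 < nxt) →
    lo ≤ bsrch s nxt lo hi ∧ bsrch s nxt lo hi ≤ hi ∧
    (∀ i, i < bsrch s nxt lo hi → s.getD i 0 < nxt) ∧
    (∀ i, bsrch s nxt lo hi ≤ i → i < s.length → ¬ s.getD i 0 < nxt) := by
  have mono : ∀ i j, i ≤ j → j < s.length → s.getD i 0 ≤ s.getD j 0 := by
    intro i j hij hj
    rcases eq_or_lt_of_le hij with rfl | hij
    · exact le_refl _
    · have := List.pairwise_iff_getElem.mp hs i j (by omega) hj hij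
      simpa [List.getD_eq_getElem?_getD, List.getElem?_eq_getElem (by omega : i < s.length),
        List.getElem?_eq_getElem hj] using le_of_lt this
  intro lo hi
  induction hn : hi - lo using Nat.strong_induction_on generalizing lo hi with
  | _ k ih =>
    intro hle hhi hlow hhigh
    rw [bsrch]
    by_cases h : lo < hi
    · simp only [dif_pos h]
      set mid := (lo + hi) / 2 with hmid
      have hm1 : lo ≤ mid := by omega
      have hm2 : mid < hi := by omega
      by_cases hc : s.getD mid 0 < nxt
      · simp only [if_pos hc]
        obtain ⟨a1, a2, a3, a4⟩ := ih (hi - (mid+1)) (by omega) (mid+1) hi rfl (by omega) hhi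
          (fun i hi' => lt_of_le_of_lt (mono i mid (by omega) (by omega)) hc) hhigh
        exact ⟨by omega, a2, a3, a4⟩
      · simp only [if_neg hc]
        obtain ⟨a1, a2, a3, a4⟩ := ih (mid - lo) (by omega) lo mid rfl (by omega) (by omega) hlow
          (fun i h1 h2 h3 => hc (lt_of_le_of_lt (mono mid i h1 h2) h3))
        exact ⟨a1, by omega, a3, a4⟩
    · simp only [dif_neg h]
      refine ⟨le_refl _, by omega, hlow, fun i h1 h2 => hhigh i (by omega) h2⟩

-- sorted-set insertion: preserves strict sortedness and adds exactly {nxt}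
theorem insSorted_spec (s : List Int) (nxt : Int) (hs : s.Pairwise (· < ·)) :
    (insSorted s nxt).Pairwise (· < ·) ∧ (∀ y, y ∈ insSorted s nxt ↔ y = nxt ∨ y ∈ s) := by
  obtain ⟨h0, hlen, hlt, hge⟩ := bsrch_spec s nxt hs 0 s.length (by omega) (le_refl _)
    (by omega) (fun i h1 h2 => absurd h1 (by omega))
  set r := bsrch s nxt 0 s.length with hr
  by_cases hc : r = s.length ∨ s.getD r 0 ≠ nxt
  · -- nxt is absent: it really gets inserted at r
    have hgt : ∀ i, r ≤ i → (h2 : i < s.length) → nxt < s[i] := by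
      intro i h1 h2
      have hrl : r < s.length := by omega
      have h4 := hge i h1 h2
      rw [List.getD_eq_getElem s 0 h2] at h4
      rcases lt_or_eq_of_le (not_lt.mp h4) with h5 | h5
      · exact h5
      · exfalso
        have hrr := hge r (le_refl _) hrl
        rw [List.getD_eq_getElem s 0 hrl] at hrr
        have : s[r] ≤ s[i] := by
          rcases eq_or_lt_of_le h1 with rfl | hlt2
          · exact le_refl _
          · exact le_of_lt (List.pairwise_iff_getElem.mp hs r i hrl h2 hlt2)
        rcases hc with hc | hc
        · exact absurd hrl (by simp [hc])
        · rw [List.getD_eq_getElem s 0 hrl] at hc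
          exact hc (le_antisymm (le_trans this (le_of_eq h5.symm)) (not_lt.mp hrr))
    have hlt' : ∀ i (h1 : i < r), s[i]'(Nat.lt_of_lt_of_le h1 hlen) < nxt := by
      intro i h1; have := hlt i h1; rwa [List.getD_eq_getElem s 0 (Nat.lt_of_lt_of_le h1 hlen)] at this
    have e1 : insSorted s nxt = s.insertIdx r nxt := by
      rw [insSorted]; simp only [← hr, if_pos hc]; exact pyInsert_natCast s r hlen nxt
    have e2 := insertIdx_take_drop s r hlen nxt
    have htake : ∀ y ∈ s.take r, y < nxt := by
      intro y hy
      obtain ⟨i, hi, rfl⟩ := List.getElem_of_mem hy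
      have hi' : i < r := by simpa using (List.length_take ▸ hi : i < min r s.length) |> fun h => by omega
      rw [List.getElem_take]
      exact hlt' i hi'
    have hdrop : ∀ y ∈ s.drop r, nxt < y := by
      intro y hy
      obtain ⟨i, hi, rfl⟩ := List.getElem_of_mem hy
      rw [List.getElem_drop]
      exact hgt (r + i) (by omega) (by simp at hi; omega)
    constructor
    · rw [e1, e2]
      rw [List.pairwise_append]
      refine ⟨hs.sublist (List.take_sublist _ _), ?_, ?_⟩
      · rw [List.pairwise_cons]
        exact ⟨hdrop, hs.sublist (List.drop_sublist _ _)⟩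
      · intro a ha b hb
        rcases List.mem_cons.mp hb with rfl | hb
        · exact htake a ha
        · exact lt_trans (htake a ha) (hdrop b hb)
    · intro y
      rw [e1, List.mem_insertIdx hlen]
  · -- nxt already present
    have e1 : insSorted s nxt = s := by rw [insSorted]; simp only [← hr, if_neg hc]
    rw [not_or, not_not] at hc
    obtain ⟨hrl, heq⟩ := hc
    have hrl : r < s.length := by omega
    have hmem : nxt ∈ s := by
      rw [List.getD_eq_getElem s 0 hrl] at heq
      rw [← heq]; exact List.getElem_mem _
    rw [e1]
    exact ⟨hs, fun y => ⟨fun h => Or.inr h, fun h => h.elim (fun h => h ▸ hmem) id⟩⟩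

-- keys after del d[k]
theorem mem_keys_erase (d : PySem.Dict Int Int) (k x : Int) :
    x ∈ (d.erase k).keys ↔ x ∈ d.keys ∧ x ≠ k := by
  simp [PySem.Dict.erase, PySem.Dict.keys, List.mem_filter]

-- min over the dict's keys is the head of the sorted list holding the same elements
theorem min_eq_head (d : PySem.Dict Int Int) (c : Int) (rest : List Int)
    (hs : (c :: rest).Pairwise (· < ·)) (hiff : ∀ x, x ∈ d.keys ↔ x ∈ c :: rest) :
    PySem.List.min? d.keys (fun x => x) = some c := by
  cases hm : PySem.List.min? d.keys (fun x => x) with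
  | none =>
    rw [PySem.List.min?_eq_none_iff] at hm
    have := (hiff c).mpr (List.mem_cons_self)
    simp [hm] at this
  | some m =>
    have h1 : m ∈ c :: rest := (hiff m).mp (PySem.List.min?_mem hm)
    have h2 : m ≤ c := PySem.List.min?_isMin hm c ((hiff c).mpr List.mem_cons_self)
    rcases List.mem_cons.mp h1 with rfl | h3
    · rfl
    · exact absurd h2 (not_le.mpr ((List.pairwise_cons.mp hs).1 m h3))

-- the loops agree whenever the dict's key set equals the sorted list's element set
theorem loop_eq (A B C : Int) : ∀ (n : Nat) (s : List Int) (d : PySem.Dict Int Int) (ans : List Int),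
    s.Pairwise (· < ·) → (∀ x, x ∈ d.keys ↔ x ∈ s) →
    solveLoopA A B C n d ans = solveLoopB A B C n s ans := by
  intro n
  induction n with
  | zero => intro s d ans _ _; rfl
  | succ n ih =>
    intro s d ans hs hiff
    cases s with
    | nil =>
      have hk : d.keys = [] := by
        cases hk : d.keys with
        | nil => rfl
        | cons k t =>
          have := (hiff k).mp (by rw [hk]; exact List.mem_cons_self)
          simp at this
      simp [solveLoopA, solveLoopB, hk, PySem.List.min?]
    | cons c rest =>
      have hrest : rest.Pairwise (· < ·) := (List.pairwise_cons.mp hs).2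
      have hcr : c ∉ rest := fun h => lt_irrefl c ((List.pairwise_cons.mp hs).1 c h)
      obtain ⟨hp1, hm1⟩ := insSorted_spec rest (A*c) hrest
      obtain ⟨hp2, hm2⟩ := insSorted_spec _ (B*c) hp1
      obtain ⟨hp3, hm3⟩ := insSorted_spec _ (C*c) hp2
      rw [solveLoopA, solveLoopB, min_eq_head d c rest hs hiff]
      apply ih _ _ _ hp3
      intro x
      rw [hm3, hm2, hm1]
      simp only [PySem.Dict.mem_keys_insert, mem_keys_erase, hiff, List.mem_cons]
      constructor
      · rintro (h | h | h | ⟨(h | h), hne⟩) <;> tauto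
      · rintro (h | h | h | h)
        · tauto
        · tauto
        · tauto
        · exact Or.inr (Or.inr (Or.inr ⟨Or.inr h, fun he => hcr (he ▸ h)⟩))

-- the initial dict {A:1,B:1,C:1} and the initial sorted({A,B,C}) hold the same elements
theorem solve_eq (A B C D : Int) : solve A B C D = solve_alt A B C D := by
  rw [solve, solve_alt]
  apply loop_eq
  · have hperm := PySem.List.sorted_perm (PySem.Set.ofList [A, B, C]) (fun x : Int => x) false
    have hnd : (PySem.List.sorted (PySem.Set.ofList [A, B, C]) (fun x : Int => x)).Nodup :=
      hperm.nodup_iff.mpr (PySem.Set.nodup_ofList _)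
    exact ((PySem.List.sorted_pairwise (PySem.Set.ofList [A, B, C]) (fun x : Int => x)).and hnd).imp
      (fun h => lt_of_le_of_ne h.1 h.2)
  · intro x
    have hperm := PySem.List.sorted_perm (PySem.Set.ofList [A, B, C]) (fun x : Int => x) false
    rw [hperm.mem_iff, PySem.Set.mem_ofList]
    simp only [PySem.Dict.mem_keys_insert, PySem.Dict.keys_empty, List.mem_cons]
    simp
    tauto

-- ===== VERDICT (by name: the statement is the Claim_ definition above) =====
theorem solve_spec : Claim_equal_solve := by
  intro A B C D _
  unfold Spec_solve
  exact solve_eq A B C D
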